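-- pv_equiv track=rewrite | github.com/nanosystemslab/Modified-Jubilee | color_mixing_demo/simulation_scripts/run_color_mixing_demo.py | iterate_wells
-- ===== SOURCE A (Python) =====
-- import string
--
-- WELL_ORDER_ROWS = list(string.ascii_uppercase[:8])  # A-H
--
-- WELL_ORDER_COLS = list(range(1, 13))                # 1-12
--
-- def iterate_wells(start=("A", 1)):
--     """Generate well positions in order starting from specified position."""
--     start_r, start_c = start
--     started = False
--
--     for r in WELL_ORDER_ROWS:
--         for c in WELL_ORDER_COLS:
--             if not started:
--                 if r == start_r and c == start_c:
--                     started = True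
--                 else:
--                     continue
--             yield (r, c)
-- ===== SOURCE B (Python) =====
-- import string
--
-- WELL_ORDER_ROWS = list(string.ascii_uppercase[:8])  # A-H
--
-- WELL_ORDER_COLS = list(range(1, 13))                # 1-12
--
-- def iterate_wells(start=("A", 1)):
--     """Generate well positions in order starting from specified position."""
--     wells = [(r, c) for r in WELL_ORDER_ROWS for c in WELL_ORDER_COLS]
--     if start in wells:
--         yield from wells[wells.index(start):]
-- ===== Notes on version B (the rewrite author's own statement) =====
-- stated objective: simpler
-- what changed: B replaces A's nested loops with a skip flag by building the ordered well list once and yielding the suffix from the start position's index (nothing if the start is absent).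
import Mathlib
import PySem

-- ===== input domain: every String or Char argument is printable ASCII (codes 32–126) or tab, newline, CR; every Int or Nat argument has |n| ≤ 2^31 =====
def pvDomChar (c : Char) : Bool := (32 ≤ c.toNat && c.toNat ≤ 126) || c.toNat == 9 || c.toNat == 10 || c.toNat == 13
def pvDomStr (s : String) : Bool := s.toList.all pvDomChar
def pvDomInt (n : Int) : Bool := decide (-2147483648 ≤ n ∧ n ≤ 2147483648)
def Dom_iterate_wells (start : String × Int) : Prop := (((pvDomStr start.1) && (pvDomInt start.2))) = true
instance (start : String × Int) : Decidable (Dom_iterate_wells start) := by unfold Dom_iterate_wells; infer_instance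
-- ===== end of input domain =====

-- B builds the ordered well list once and yields the suffix from the start's index; A scans with a 'started' flag.

-- shared module constants (WELL_ORDER_ROWS, WELL_ORDER_COLS)
def pvRows : List String := ["A","B","C","D","E","F","G","H"]
def pvCols : List Int := [1,2,3,4,5,6,7,8,9,10,11,12]

-- ===== PORT A =====
-- nested for-loops with the 'started' flag, state = (started, yielded so far)
def iterate_wells (start : String × Int) : List (String × Int) :=
  (pvRows.foldl (fun st r =>
    pvCols.foldl (fun st c =>
      if st.1 = false then
        if r = start.1 ∧ c = start.2 then (true, st.2 ++ [(r, c)]) else st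
      else (st.1, st.2 ++ [(r, c)])) st) (false, ([] : List (String × Int)))).2

-- ===== PORT B =====
-- wells = [(r, c) for r in ROWS for c in COLS]
def pvWells : List (String × Int) := pvRows.flatMap (fun r => pvCols.map (fun c => (r, c)))

-- if start in wells: yield from wells[wells.index(start):]
def iterate_wells_alt (start : String × Int) : List (String × Int) :=
  match PySem.List.index? pvWells start with
  | none => []
  | some i => PySem.List.slice pvWells (some (i : Int)) none

-- ===== PRECONDITION & SPEC =====
def Spec_iterate_wells (start : String × Int) (out : List (String × Int)) : Prop := out = iterate_wells_alt start
instance (start : String × Int) (out : List (String × Int)) : Decidable (Spec_iterate_wells start out) := by unfold Spec_iterate_wells; infer_instance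

-- ===== CLAIM (what is proved, stated in full; the proofs are below) =====
def Claim_equal_iterate_wells : Prop := ∀ (start : String × Int), Dom_iterate_wells start → Spec_iterate_wells start (iterate_wells start)

-- ===== LEMMAS AND PROOFS =====

-- A's loop body on a flattened element
def pvStep (s : String × Int) (st : Bool × List (String × Int)) (x : String × Int) : Bool × List (String × Int) :=
  if st.1 = false then
    if x = s then (true, st.2 ++ [x]) else st
  else (st.1, st.2 ++ [x])

lemma pvStep_nested (s : String × Int) (init : Bool × List (String × Int)) :
    pvRows.foldl (fun st r =>
      pvCols.foldl (fun st c =>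
        if st.1 = false then
          if r = s.1 ∧ c = s.2 then (true, st.2 ++ [(r, c)]) else st
        else (st.1, st.2 ++ [(r, c)])) st) init
    = pvWells.foldl (pvStep s) init := by
  simp only [pvWells, List.foldl_flatMap, List.foldl_map]
  apply PySem.List.foldl_congr_mem
  intro st r _
  apply PySem.List.foldl_congr_mem
  intro st' c _
  have h : ((r, c) = s) ↔ (r = s.1 ∧ c = s.2) := by
    cases s; simp [Prod.ext_iff]
  simp only [pvStep, h]

lemma pvStep_true (s : String × Int) (L : List (String × Int)) (acc : List (String × Int)) :
    L.foldl (pvStep s) (true, acc) = (true, acc ++ L) := by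
  induction L generalizing acc with
  | nil => simp
  | cons x t ih => simp [pvStep, ih]

lemma pvStep_false (s : String × Int) (L : List (String × Int)) (acc : List (String × Int)) :
    (L.foldl (pvStep s) (false, acc)).2
    = acc ++ (match PySem.List.index? L s with
              | none => []
              | some i => L.drop i) := by
  induction L generalizing acc with
  | nil => simp [PySem.List.index?]
  | cons x t ih =>
    by_cases hx : x = s
    · subst hx
      rw [PySem.List.index?_cons_self]
      simp [pvStep, pvStep_true]
    · rw [PySem.List.index?_cons_of_ne t hx]
      have : List.foldl (pvStep s) (false, acc) (x :: t) = List.foldl (pvStep s) (false, acc) t := by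
        simp [pvStep, hx]
      rw [this, ih]
      cases h : PySem.List.index? t s <;> simp

-- ===== VERDICT (by name: the statement is the Claim_ definition above) =====
theorem iterate_wells_spec : Claim_equal_iterate_wells := by
  intro start _
  unfold Spec_iterate_wells iterate_wells iterate_wells_alt
  rw [pvStep_nested, pvStep_false]
  cases h : PySem.List.index? pvWells start with
  | none => simp
  | some i => simp [PySem.List.slice_from_natCast]
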